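-- pv_equiv track=rewrite | github.com/alsts/algorithms | neetcode/advanced/combinatorics/permutations/permutations_iterative.py | permutations_iterative
-- ===== SOURCE A (Python) =====
-- def permutations_iterative(nums):
--     perms = [[]]
--
--     # Loop through Each Number:
--     for n in nums:
--         cur_num_perms = []
--         # Loop through Previous round permutations:
--         for p in perms:
--             # Loop through Slots for insertion of number:
--             for i in range(len(p) + 1):
--                 p_copy = p.copy()
--                 p_copy.insert(i, n)
--                 cur_num_perms.append(p_copy)
--         perms = cur_num_perms
--
--     return perms
-- ===== SOURCE B (Python) =====
-- def permutations_iterative(nums):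
--     if not nums:
--         return [[]]
--     prev = permutations_iterative(nums[:-1])
--     last = nums[-1]
--     return [p[:i] + [last] + p[i:] for p in prev for i in range(len(p) + 1)]
-- ===== Notes on version B (the rewrite author's own statement) =====
-- stated objective: alternative
-- what changed: Replaces A's iterative outer loop with triple-nested explicit loops and an accumulator list by structural recursion on nums[:-1] with a single comprehension inserting the last element at each slot; identical output order.
import Mathlib
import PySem

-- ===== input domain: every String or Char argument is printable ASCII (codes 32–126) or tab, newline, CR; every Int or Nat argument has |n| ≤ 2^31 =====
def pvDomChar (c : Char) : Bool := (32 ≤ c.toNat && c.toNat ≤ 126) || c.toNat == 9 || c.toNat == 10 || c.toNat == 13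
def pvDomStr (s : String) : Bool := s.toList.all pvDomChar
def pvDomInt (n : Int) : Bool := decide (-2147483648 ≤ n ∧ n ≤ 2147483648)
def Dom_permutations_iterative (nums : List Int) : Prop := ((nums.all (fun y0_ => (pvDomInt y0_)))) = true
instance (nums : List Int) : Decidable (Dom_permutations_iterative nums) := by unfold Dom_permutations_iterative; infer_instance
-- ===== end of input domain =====

-- B replaces A's iterative outer loop by structural recursion on nums[:-1] with a
-- single comprehension (flatMap/map) building the insertions; same output order.

-- ===== PORT A =====
-- literal transliteration: perms = [[]]; triple nested loop, cur_num_perms built by append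
def permutations_iterative (nums : List Int) : List (List Int) :=
  nums.foldl
    (fun perms n =>
      perms.foldl
        (fun cur p =>
          (PySem.List.pyRange 0 ((p.length : Int) + 1) 1).foldl
            (fun cur2 i => cur2 ++ [PySem.List.insert p i n]) cur)
        [])
    [[]]

-- ===== PORT B =====
-- literal transliteration of Source B: recursion on nums[:-1], comprehension over prev × slots
def permutations_iterative_alt (nums : List Int) : List (List Int) :=
  match nums with
  | [] => [[]]
  | x :: rest =>
    let prev := permutations_iterative_alt (PySem.List.slice (x :: rest) none (some (-1)))
    let last := (x :: rest).getLast (List.cons_ne_nil x rest)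
    prev.flatMap (fun p =>
      (PySem.List.pyRange 0 ((p.length : Int) + 1) 1).map (fun i =>
        PySem.List.slice p none (some i) ++ [last] ++ PySem.List.slice p (some i) none))
termination_by nums.length
decreasing_by simp [PySem.List.slice_to_neg_one]

-- ===== PRECONDITION & SPEC =====
def Spec_permutations_iterative (nums : List Int) (out : List (List Int)) : Prop := out = permutations_iterative_alt nums
instance (nums : List Int) (out : List (List Int)) : Decidable (Spec_permutations_iterative nums out) := by unfold Spec_permutations_iterative; infer_instance

-- ===== CLAIM (what is proved, stated in full; the proofs are below) =====
def Claim_equal_permutations_iterative : Prop := ∀ (nums : List Int), Dom_permutations_iterative nums → Spec_permutations_iterative nums (permutations_iterative nums)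

-- ===== LEMMAS AND PROOFS =====

-- one step of A: what both programs do with one number n over the previous perms
def pvStep (perms : List (List Int)) (n : Int) : List (List Int) :=
  perms.flatMap (fun p =>
    (PySem.List.pyRange 0 ((p.length : Int) + 1) 1).map (fun i => PySem.List.insert p i n))

-- the slice-built insertion equals PySem.List.insert for slots 0 ≤ i ≤ len p
theorem pv_slice_insert (p : List Int) (n : Int) (i : Int) (h0 : 0 ≤ i) (h1 : i < (p.length : Int) + 1) :
    PySem.List.slice p none (some i) ++ [n] ++ PySem.List.slice p (some i) none
      = PySem.List.insert p i n := by
  obtain ⟨k, rfl⟩ := Int.eq_ofNat_of_zero_le h0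
  have hk : k ≤ p.length := by exact_mod_cast Int.lt_add_one_iff.mp h1
  rw [PySem.List.slice_to_natCast, PySem.List.slice_from_natCast,
      PySem.List.insert_natCast p k n hk]
  simp

-- A's inner two loops compute pvStep
theorem pvA_inner (perms : List (List Int)) (n : Int) :
    perms.foldl
      (fun cur p =>
        (PySem.List.pyRange 0 ((p.length : Int) + 1) 1).foldl
          (fun cur2 i => cur2 ++ [PySem.List.insert p i n]) cur)
      [] = pvStep perms n := by
  have hinner : ∀ (p : List Int) (cur : List (List Int)),
      (PySem.List.pyRange 0 ((p.length : Int) + 1) 1).foldl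
        (fun cur2 i => cur2 ++ [PySem.List.insert p i n]) cur
      = cur ++ (PySem.List.pyRange 0 ((p.length : Int) + 1) 1).map
          (fun i => PySem.List.insert p i n) := by
    intro p cur
    rw [PySem.List.foldl_append_eq_flatMap]
    have hs : ∀ (l : List Int) (g : Int → List Int),
        l.flatMap (fun i => [g i]) = l.map g := by
      intro l g; induction l with
      | nil => rfl
      | cons a t ih => simp [List.flatMap_cons, ih]
    rw [hs]
  have : ∀ (acc : List (List Int)),
      perms.foldl
        (fun cur p =>
          (PySem.List.pyRange 0 ((p.length : Int) + 1) 1).foldl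
            (fun cur2 i => cur2 ++ [PySem.List.insert p i n]) cur)
        acc = acc ++ pvStep perms n := by
    induction perms with
    | nil => intro acc; simp [pvStep]
    | cons p ps ih =>
      intro acc
      rw [List.foldl_cons, ih, hinner p acc]
      simp [pvStep, List.flatMap_cons, List.append_assoc]
  simpa using this []

-- B on xs ++ [x] unfolds to one pvStep over B xs
theorem pvB_concat (xs : List Int) (x : Int) :
    permutations_iterative_alt (xs ++ [x]) = pvStep (permutations_iterative_alt xs) x := by
  rcases h : xs ++ [x] with _ | ⟨y, ys⟩
  · simp at h
  · rw [permutations_iterative_alt]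
    have hd : PySem.List.slice (y :: ys) none (some (-1)) = xs := by
      rw [← h, PySem.List.slice_to_neg_one, List.dropLast_concat]
    have hl : (y :: ys).getLast (List.cons_ne_nil y ys) = x := by
      have h2 : (y :: ys).getLast? = some x := by rw [← h]; simp
      have h3 := List.getLast?_eq_some_getLast (l := y :: ys) (List.cons_ne_nil y ys)
      rw [h3] at h2
      exact Option.some.inj h2
    rw [hd, hl, pvStep]
    refine List.flatMap_congr ?_ ; intro p _
    refine List.map_congr_left ?_ ; intro i hi
    have hmem := (PySem.List.mem_pyRange_one).mp hi
    exact pv_slice_insert p x i hmem.1 hmem.2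

-- the two ports agree on every input
theorem pv_main (nums : List Int) :
    permutations_iterative nums = permutations_iterative_alt nums := by
  induction nums using List.reverseRecOn with
  | nil => rw [permutations_iterative_alt]; rfl
  | append_singleton xs x ih =>
    rw [pvB_concat, ← ih]
    unfold permutations_iterative
    rw [List.foldl_append]
    simp only [List.foldl_cons, List.foldl_nil]
    exact pvA_inner _ x

-- ===== VERDICT (by name: the statement is the Claim_ definition above) =====
theorem permutations_iterative_spec : Claim_equal_permutations_iterative :=
  fun nums _ => pv_main nums
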